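-- pv_equiv track=rewrite | github.com/Yash-Bhandari/qmkformat | qmkformat/parser.py | merge_split_consecutive_keycodes
-- ===== SOURCE A (Python) =====
-- from typing import List
--
-- def merge_split_consecutive_keycodes(keys: List[str]):
--     incomplete_keycode=''
--     merged_keys = []
--     for key in keys:
--         if incomplete_keycode:
--             key = f'{incomplete_keycode},{key}'
--             incomplete_keycode = ''
--         if key.count('(') == key.count(')'):
--             merged_keys.append(key)
--         else:
--             incomplete_keycode = key
--     return merged_keys
-- ===== SOURCE B (Python) =====
-- from typing import List
--
-- def merge_split_consecutive_keycodes(keys: List[str]):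
--     merged_keys = []
--     pending = []
--     balance = 0
--     for key in keys:
--         pending.append(key)
--         balance += key.count('(') - key.count(')')
--         if balance == 0:
--             merged_keys.append(','.join(pending))
--             pending = []
--             balance = 0
--     return merged_keys
-- ===== Notes on version B (the rewrite author's own statement) =====
-- stated objective: alternative
-- what changed: B keeps a list of pending tokens and a running parenthesis-balance counter updated per token, joining once at flush time, instead of A's re-concatenating the accumulated string and re-scanning it with count() on every iteration.
import Mathlib
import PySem

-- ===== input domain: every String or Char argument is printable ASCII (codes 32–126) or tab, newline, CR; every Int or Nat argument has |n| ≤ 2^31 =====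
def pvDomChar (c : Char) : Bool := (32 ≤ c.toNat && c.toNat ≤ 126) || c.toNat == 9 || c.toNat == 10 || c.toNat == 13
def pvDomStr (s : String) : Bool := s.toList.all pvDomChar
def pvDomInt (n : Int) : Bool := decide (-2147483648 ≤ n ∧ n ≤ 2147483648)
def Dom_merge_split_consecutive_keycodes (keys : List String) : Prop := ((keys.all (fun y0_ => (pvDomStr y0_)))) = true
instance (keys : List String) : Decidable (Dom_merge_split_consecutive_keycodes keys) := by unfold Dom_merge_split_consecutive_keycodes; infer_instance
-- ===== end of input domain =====

-- B replaces A's grow-and-recount string accumulation with a list of pending tokens and a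
-- running paren-balance counter, joining once per flush (objective: alternative decomposition).

-- ===== PORT A =====
-- state: (incomplete_keycode, merged_keys)
def pvStepA (st : String × List String) (key : String) : String × List String :=
  let key := if st.1 ≠ "" then st.1 ++ "," ++ key else key
  if PySem.Str.count key "(" = PySem.Str.count key ")" then ("", st.2 ++ [key])
  else (key, st.2)

def merge_split_consecutive_keycodes (keys : List String) : List String :=
  (keys.foldl pvStepA ("", [])).2

-- ===== PORT B =====
-- state: (pending, balance, merged_keys)
def pvStepB (st : List String × Int × List String) (key : String) : List String × Int × List String :=
  let pending := st.1 ++ [key]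
  let balance := st.2.1 + (PySem.Str.count key "(" : Int) - (PySem.Str.count key ")" : Int)
  if balance = 0 then ([], 0, st.2.2 ++ [PySem.Str.join "," pending])
  else (pending, balance, st.2.2)

def merge_split_consecutive_keycodes_alt (keys : List String) : List String :=
  (keys.foldl pvStepB ([], 0, [])).2.2

-- ===== PRECONDITION & SPEC =====
def Spec_merge_split_consecutive_keycodes (keys : List String) (out : List String) : Prop := out = merge_split_consecutive_keycodes_alt keys
instance (keys : List String) (out : List String) : Decidable (Spec_merge_split_consecutive_keycodes keys out) := by unfold Spec_merge_split_consecutive_keycodes; infer_instance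

-- ===== CLAIM (what is proved, stated in full; the proofs are below) =====
def Claim_equal_merge_split_consecutive_keycodes : Prop := ∀ (keys : List String), Dom_merge_split_consecutive_keycodes keys → Spec_merge_split_consecutive_keycodes keys (merge_split_consecutive_keycodes keys)

-- ===== LEMMAS AND PROOFS =====

-- PySem.Chars.count with a single-character needle is List.count (no such bridge lemma in the prelude).
lemma pv_go_single (c : Char) (fuel : Nat) : ∀ (l : List Char) (acc : Nat), l.length ≤ fuel →
    PySem.Chars.count.go [c] fuel l acc = acc + l.count c := by
  induction fuel with
  | zero => intro l acc h
            cases l with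
            | nil => simp [PySem.Chars.count.go]
            | cons x t => simp at h
  | succ n ih =>
    intro l acc h
    cases l with
    | nil => simp [PySem.Chars.count.go]
    | cons x t =>
      simp only [PySem.Chars.count.go]
      by_cases hx : x = c
      · subst hx
        rw [if_pos (by simp [List.isPrefixOf])]
        have hd : List.drop [x].length (x :: t) = t := by simp
        rw [hd, ih t (acc+1) (by simpa using h)]
        simp; omega
      · have hcx : ¬ (c = x) := fun h' => hx h'.symm
        rw [if_neg (by simp [List.isPrefixOf, hcx])]
        rw [ih t acc (by simpa using h)]
        simp [hx]

lemma pv_count_single (cs : List Char) (c : Char) : PySem.Chars.count cs [c] = cs.count c := by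
  simpa [PySem.Chars.count] using pv_go_single c cs.length cs 0 le_rfl

-- two strings with the same character list are equal
lemma pv_str_ext {s t : String} (h : s.toList = t.toList) : s = t := by
  have h' := congrArg String.ofList h
  rwa [String.ofList_toList, String.ofList_toList] at h'

-- net parenthesis balance of a character list
def pvNet (cs : List Char) : Int := (cs.count '(' : Int) - (cs.count ')' : Int)

lemma pvNet_append (a b : List Char) : pvNet (a ++ b) = pvNet a + pvNet b := by
  simp [pvNet, List.count_append]; omega

lemma pvNet_comma : pvNet [','] = 0 := by decide

lemma pv_intercalate_cons_cons (sep x y : List Char) (zs : List (List Char)) :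
    sep.intercalate (x :: y :: zs) = x ++ sep ++ sep.intercalate (y :: zs) := by
  simp [List.intercalate, List.intersperse]

lemma pv_intercalate_append_singleton (sep y : List Char) :
    ∀ (xs : List (List Char)), xs ≠ [] →
    sep.intercalate (xs ++ [y]) = sep.intercalate xs ++ sep ++ y := by
  intro xs
  induction xs with
  | nil => intro h; exact absurd rfl h
  | cons x t ih =>
    intro _
    cases t with
    | nil => simp [List.intercalate, List.intersperse]
    | cons z zs =>
      simp only [List.cons_append]
      rw [pv_intercalate_cons_cons]
      rw [show z :: (zs ++ [y]) = (z :: zs) ++ [y] from rfl]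
      rw [ih (by simp), pv_intercalate_cons_cons]
      simp [List.append_assoc]

-- normalized forms of the two loop bodies
lemma pvStepA_empty (merged : List String) (key : String) :
    pvStepA ("", merged) key =
      if key.toList.count '(' = key.toList.count ')' then ("", merged ++ [key])
      else (key, merged) := by
  simp [pvStepA, pv_count_single]

lemma pvStepA_ne (inc : String) (h : inc ≠ "") (merged : List String) (key : String) :
    pvStepA (inc, merged) key =
      if (inc ++ "," ++ key).toList.count '(' = (inc ++ "," ++ key).toList.count ')'
      then ("", merged ++ [inc ++ "," ++ key]) else (inc ++ "," ++ key, merged) := by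
  simp [pvStepA, pv_count_single, h]

lemma pvStepB_eq (pending : List String) (balance : Int) (res : List String) (key : String) :
    pvStepB (pending, balance, res) key =
      if balance + (key.toList.count '(' : Int) - (key.toList.count ')' : Int) = 0
      then ([], 0, res ++ [PySem.Str.join "," (pending ++ [key])])
      else (pending ++ [key], balance + (key.toList.count '(' : Int) - (key.toList.count ')' : Int), res) := by
  simp [pvStepB, pv_count_single]

lemma pv_empty_join : ("" : String).toList = PySem.Chars.join [','] (([] : List String).map String.toList) := by
  simp [PySem.Chars.join, List.intercalate]

lemma pv_join_singleton (key : String) :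
    key.toList = PySem.Chars.join [','] (([key] : List String).map String.toList) := by
  simp [PySem.Chars.join, List.intercalate]

-- the loop invariant: A's state (inc, merged) corresponds to B's state (pending, balance, res)
lemma pv_loop (keys : List String) :
    ∀ (inc : String) (merged : List String) (pending : List String) (balance : Int) (res : List String),
    res = merged →
    inc.toList = PySem.Chars.join [','] (pending.map String.toList) →
    balance = pvNet inc.toList →
    (pending ≠ [] → balance ≠ 0) →
    (keys.foldl pvStepA (inc, merged)).2 = (keys.foldl pvStepB (pending, balance, res)).2.2 := by
  induction keys with
  | nil => intro inc merged pending balance res h1 _ _ _; simpa using h1.symm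
  | cons key rest ih =>
    intro inc merged pending balance res h1 h2 h3 h4
    simp only [List.foldl_cons]
    by_cases hp : pending = []
    · -- incomplete_keycode is empty, balance is 0
      subst hp
      have hincL : inc.toList = [] := by
        simpa [PySem.Chars.join, List.intercalate, List.intersperse] using h2
      have hinc : inc = "" := pv_str_ext (by simp [hincL])
      have hbal : balance = 0 := by rw [h3, hincL]; simp [pvNet]
      subst hinc hbal
      rw [pvStepA_empty, pvStepB_eq]
      by_cases hc : key.toList.count '(' = key.toList.count ')'
      · rw [if_pos hc, if_pos (by omega)]
        refine ih "" (merged ++ [key]) [] 0 (res ++ [PySem.Str.join "," ([] ++ [key])]) ?_ pv_empty_join (by simp [pvNet]) (by simp)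
        rw [h1]
        congr 1
        refine congrArg (fun s => [s]) (pv_str_ext ?_)
        rw [PySem.Str.toList_join]
        simpa using (pv_join_singleton key).symm
      · rw [if_neg hc, if_neg (by omega)]
        exact ih key merged [key] _ res h1 (pv_join_singleton key)
          (by simp [pvNet]) (fun _ => by omega)
    · -- incomplete_keycode is the joined pending tokens, balance its net count
      have hbne := h4 hp
      have hincne : inc ≠ "" := by
        intro h; apply hbne; rw [h3, h]; simp [pvNet]
      have hKlist : (inc ++ "," ++ key).toList = inc.toList ++ [','] ++ key.toList := by simp
      have hjoinL : PySem.Chars.join [','] ((pending ++ [key]).map String.toList)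
          = (inc ++ "," ++ key).toList := by
        simp only [PySem.Chars.join, List.map_append, List.map_cons, List.map_nil]
        rw [pv_intercalate_append_singleton [','] key.toList (pending.map String.toList)
              (by simpa using hp)]
        simp only [PySem.Chars.join] at h2
        rw [← h2, hKlist]
      have hKnet : pvNet (inc ++ "," ++ key).toList
          = balance + (key.toList.count '(' : Int) - (key.toList.count ')' : Int) := by
        rw [hKlist, pvNet_append, pvNet_append, pvNet_comma, h3]
        simp only [pvNet]; omega
      rw [pvStepA_ne inc hincne, pvStepB_eq]
      by_cases hc : (inc ++ "," ++ key).toList.count '(' = (inc ++ "," ++ key).toList.count ')'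
      · have hb0 : balance + (key.toList.count '(' : Int) - (key.toList.count ')' : Int) = 0 := by
          rw [← hKnet]; simp only [pvNet]; omega
        rw [if_pos hc, if_pos hb0]
        refine ih "" (merged ++ [inc ++ "," ++ key]) [] 0 _ ?_ pv_empty_join (by simp [pvNet]) (by simp)
        rw [h1]
        congr 1
        refine congrArg (fun s => [s]) (pv_str_ext ?_)
        rw [PySem.Str.toList_join]
        simpa using hjoinL
      · have hb0 : ¬ (balance + (key.toList.count '(' : Int) - (key.toList.count ')' : Int) = 0) := by
          rw [← hKnet]; simp only [pvNet]; omega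
        rw [if_neg hc, if_neg hb0]
        exact ih (inc ++ "," ++ key) merged (pending ++ [key]) _ res h1 hjoinL.symm
          hKnet.symm (fun _ => hb0)

-- ===== VERDICT (by name: the statement is the Claim_ definition above) =====
theorem merge_split_consecutive_keycodes_spec : Claim_equal_merge_split_consecutive_keycodes := by
  intro keys _
  unfold Spec_merge_split_consecutive_keycodes merge_split_consecutive_keycodes merge_split_consecutive_keycodes_alt
  exact pv_loop keys "" [] [] 0 [] rfl pv_empty_join (by simp [pvNet]) (by simp)
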